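-- pv_equiv track=rewrite | github.com/laaam8203/DA_Homework_3 | equivalence_checker.py | _and_cube
-- ===== SOURCE A (Python) =====
-- def _and_cube(a: str, b: str):
--     """Intersect two cubes. Returns None if empty."""
--     result = []
--     for ca, cb in zip(a, b):
--         if ca == '-':
--             result.append(cb)
--         elif cb == '-':
--             result.append(ca)
--         elif ca == cb:
--             result.append(ca)
--         else:
--             return None
--     return ''.join(result)
-- ===== SOURCE B (Python) =====
-- def _merge(pairs):
--     """Divide-and-conquer merge of a list of (ca, cb) pairs; None on conflict."""
--     n = len(pairs)
--     if n == 0: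
--         return ""
--     if n == 1:
--         ca, cb = pairs[0]
--         if ca == '-':
--             return cb
--         if cb == '-':
--             return ca
--         if ca == cb:
--             return ca
--         return None
--     mid = n // 2
--     left = _merge(pairs[:mid])
--     if left is None:
--         return None
--     right = _merge(pairs[mid:])
--     if right is None:
--         return None
--     return left + right
--
--
-- def _and_cube(a: str, b: str):
--     """Intersect two cubes. Returns None if empty.
--
--     Divide-and-conquer: zip once, then recursively merge halves of the pair list."""
--     return _merge(list(zip(a, b)))
-- ===== Notes on version B (the rewrite author's own statement) =====
-- stated objective: alternative
-- what changed: Replaces A's single fused left-to-right loop (conflict check, append and early return interleaved) with a divide-and-conquer recursion: zip once, then recursively merge the two halves of the pair list, with a single-pair base case and concatenation of half-results.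
import Mathlib
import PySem

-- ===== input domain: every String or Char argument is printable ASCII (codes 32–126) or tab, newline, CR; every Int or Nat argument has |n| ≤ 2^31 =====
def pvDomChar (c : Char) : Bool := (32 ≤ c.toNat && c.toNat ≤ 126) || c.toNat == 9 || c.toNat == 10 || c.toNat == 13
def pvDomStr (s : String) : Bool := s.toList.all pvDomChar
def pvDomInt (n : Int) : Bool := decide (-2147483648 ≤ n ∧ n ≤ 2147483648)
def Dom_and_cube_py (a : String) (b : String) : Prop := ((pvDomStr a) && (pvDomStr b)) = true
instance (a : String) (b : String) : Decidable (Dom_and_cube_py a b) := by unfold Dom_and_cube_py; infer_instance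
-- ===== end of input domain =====

-- B replaces A's fused left-to-right loop with a divide-and-conquer merge over the zipped pairs (alternative decomposition, same results).


-- ===== PORT A =====
-- fused loop: append to result as we go, return none on conflict
def pvGoA : List (Char × Char) → List Char → Option (List Char)
  | [], res => some res
  | (ca, cb) :: t, res =>
    if ca = '-' then pvGoA t (res ++ [cb])
    else if cb = '-' then pvGoA t (res ++ [ca])
    else if ca = cb then pvGoA t (res ++ [ca])
    else none

def and_cube_py (a : String) (b : String) : Option String :=
  (pvGoA (a.toList.zip b.toList) []).map String.ofList

-- ===== PORT B =====
-- divide-and-conquer merge of the pair list: single-pair base case, recurse on halves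
def pvMerge : List (Char × Char) → Option (List Char)
  | [] => some []
  | [(ca, cb)] =>
    if ca = '-' then some [cb]
    else if cb = '-' then some [ca]
    else if ca = cb then some [ca]
    else none
  | p :: q :: t =>
    let mid := (p :: q :: t).length / 2
    match pvMerge ((p :: q :: t).take mid) with
    | none => none
    | some left =>
      match pvMerge ((p :: q :: t).drop mid) with
      | none => none
      | some right => some (left ++ right)
  termination_by l => l.length
  decreasing_by
  · simp only [List.length_take, List.length_cons]; omega
  · simp only [List.length_drop, List.length_cons]; omega

def and_cube_py_alt (a : String) (b : String) : Option String :=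
  (pvMerge (a.toList.zip b.toList)).map String.ofList

-- ===== PRECONDITION & SPEC =====
def Spec_and_cube_py (a : String) (b : String) (out : Option String) : Prop := out = and_cube_py_alt a b
instance (a : String) (b : String) (out : Option String) : Decidable (Spec_and_cube_py a b out) := by unfold Spec_and_cube_py; infer_instance

-- ===== CLAIM (what is proved, stated in full; the proofs are below) =====
def Claim_equal_and_cube_py : Prop := ∀ (a : String) (b : String), Dom_and_cube_py a b → Spec_and_cube_py a b (and_cube_py a b)

-- ===== LEMMAS AND PROOFS =====
-- shared closed form of both ports
def pvConflict (p : Char × Char) : Bool := p.1 != p.2 && p.1 != '-' && p.2 != '-'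
def pvBuild (p : Char × Char) : Char := if p.2 = '-' then p.1 else p.2

theorem pvGoA_char : ∀ (l : List (Char × Char)) (res : List Char),
    pvGoA l res = if l.any pvConflict then none else some (res ++ l.map pvBuild) := by
  intro l
  induction l with
  | nil => intro res; simp [pvGoA]
  | cons h t ih =>
    intro res
    obtain ⟨ca, cb⟩ := h
    by_cases hca : ca = '-'
    · subst hca
      by_cases hcb : cb = '-'
      · subst hcb; simp [pvGoA, ih, pvConflict, pvBuild]
      · simp [pvGoA, ih, hcb, pvConflict, pvBuild]
    · by_cases hcb : cb = '-'
      · subst hcb; simp [pvGoA, ih, hca, pvConflict, pvBuild]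
      · by_cases heq : ca = cb
        · subst heq; simp [pvGoA, ih, hca, pvConflict, pvBuild]
        · simp [pvGoA, hca, hcb, heq, pvConflict]

theorem pvMerge_char_aux : ∀ (n : Nat) (l : List (Char × Char)), l.length ≤ n →
    pvMerge l = if l.any pvConflict then none else some (l.map pvBuild) := by
  intro n
  induction n with
  | zero =>
    intro l hl
    have : l = [] := List.eq_nil_of_length_eq_zero (Nat.le_zero.mp hl)
    subst this; simp [pvMerge]
  | succ n ih =>
    intro l hl
    match l with
    | [] => simp [pvMerge]
    | [(ca, cb)] =>
      by_cases hca : ca = '-'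
      · subst hca; by_cases hcb : cb = '-'
        · subst hcb; simp [pvMerge, pvConflict, pvBuild]
        · simp [pvMerge, hcb, pvConflict, pvBuild]
      · by_cases hcb : cb = '-'
        · subst hcb; simp [pvMerge, hca, pvConflict, pvBuild]
        · by_cases heq : ca = cb
          · subst heq; simp [pvMerge, hca, pvConflict, pvBuild]
          · simp [pvMerge, hca, hcb, heq, pvConflict]
    | p :: q :: t =>
      have hlen : (p :: q :: t).length ≤ n + 1 := hl
      have hmid1 : ((p :: q :: t).take ((p :: q :: t).length / 2)).length ≤ n := by
        simp only [List.length_take, List.length_cons] at *; omega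
      have hmid2 : ((p :: q :: t).drop ((p :: q :: t).length / 2)).length ≤ n := by
        simp only [List.length_drop, List.length_cons] at *; omega
      have h1 := ih _ hmid1
      have h2 := ih _ hmid2
      rw [pvMerge]
      rw [h1, h2]
      have hsplit := List.take_append_drop ((p :: q :: t).length / 2) (p :: q :: t)
      have hany : (p :: q :: t).any pvConflict
          = (((p :: q :: t).take ((p :: q :: t).length / 2)).any pvConflict
             || ((p :: q :: t).drop ((p :: q :: t).length / 2)).any pvConflict) := by
        conv_lhs => rw [← hsplit]
        rw [List.any_append]
      by_cases c1 : ((p :: q :: t).take ((p :: q :: t).length / 2)).any pvConflict = true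
      · rw [if_pos c1, hany, c1]
        simp
      · have c1' := Bool.eq_false_iff.mpr c1
        rw [if_neg c1]
        by_cases c2 : ((p :: q :: t).drop ((p :: q :: t).length / 2)).any pvConflict = true
        · rw [if_pos c2, hany, c2]
          simp
        · have c2' := Bool.eq_false_iff.mpr c2
          rw [if_neg c2, hany, c1', c2']
          show some (_ ++ _) = _
          rw [← List.map_append, hsplit]
          simp

theorem pvMerge_char (l : List (Char × Char)) :
    pvMerge l = if l.any pvConflict then none else some (l.map pvBuild) :=
  pvMerge_char_aux l.length l le_rfl

-- ===== VERDICT (by name: the statement is the Claim_ definition above) =====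
theorem and_cube_py_spec : Claim_equal_and_cube_py := by
  intro a b _
  unfold Spec_and_cube_py and_cube_py and_cube_py_alt
  rw [pvGoA_char, pvMerge_char]
  by_cases h : ((a.toList.zip b.toList).any pvConflict) = true
  · simp [h]
  · simp [h]
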